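-- pv_equiv track=rewrite | github.com/sqz1337/dialogue_segmentation | lib/pipelines/utilities/dataset.py | get_boundaries
-- ===== SOURCE A (Python) =====
-- def get_boundaries(labels):
--     assert len(labels) > 1
--     boundaries = ['0']
--     for i in range(1, len(labels)):
--         if labels[i] != labels[i - 1]:
--             boundaries.append('1')
--         else:
--             boundaries.append('0')
--     return ''.join(boundaries)
-- ===== SOURCE B (Python) =====
-- def get_boundaries(labels):
--     assert len(labels) > 1
--     # run-length encode consecutive equal labels, then expand each run:
--     # first run -> all '0'; every later run -> '1' followed by (run-1) '0's
--     runs = []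
--     cnt = 0
--     prev = None
--     for x in labels:
--         if cnt and x == prev:
--             cnt += 1
--         else:
--             if cnt:
--                 runs.append(cnt)
--             cnt = 1
--             prev = x
--     runs.append(cnt)
--     parts = ['0' * runs[0]]
--     for r in runs[1:]:
--         parts.append('1' + '0' * (r - 1))
--     return ''.join(parts)
-- ===== Notes on version B (the rewrite author's own statement) =====
-- stated objective: alternative
-- what changed: Replaces the per-index neighbour comparison loop by run-length encoding the label sequence and expanding each run ('0'*first run, then '1'+'0'*(run-1) per later run).
import Mathlib
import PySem

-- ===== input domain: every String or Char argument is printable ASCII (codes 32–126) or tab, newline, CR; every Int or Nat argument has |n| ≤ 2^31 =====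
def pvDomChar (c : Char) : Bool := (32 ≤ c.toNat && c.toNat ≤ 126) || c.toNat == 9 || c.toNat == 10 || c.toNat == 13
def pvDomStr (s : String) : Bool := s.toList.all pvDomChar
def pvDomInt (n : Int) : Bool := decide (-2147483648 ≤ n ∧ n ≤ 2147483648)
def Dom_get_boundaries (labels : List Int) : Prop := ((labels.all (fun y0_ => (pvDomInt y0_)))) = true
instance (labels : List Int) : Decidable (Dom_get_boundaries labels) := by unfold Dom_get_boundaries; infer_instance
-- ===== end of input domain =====

-- B replaces A's per-index neighbour comparison by run-length encoding plus expansion (same cost, different decomposition).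

-- ===== PORT A =====
-- ''.join over a list of one-character strings is ported as String.mk of the collected chars (exact).
def get_boundaries (labels : List Int) : String :=
  let boundaries : List Char :=
    (PySem.List.pyRange 1 (PySem.List.len labels) 1).foldl
      (fun acc i =>
        acc ++ [if PySem.List.pyGetD labels i 0 ≠ PySem.List.pyGetD labels (i - 1) 0 then '1' else '0'])
      ['0']
  String.mk boundaries

-- ===== PORT B =====
-- run-length encoding loop of Source B: cnt counts the current run, a finished run is emitted on change
def runsGo (prev : Int) (cnt : Nat) : List Int → List Nat
  | [] => [cnt]
  | y :: ys => if y == prev then runsGo prev (cnt + 1) ys else cnt :: runsGo y 1 ys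

-- parts construction of Source B: '0'*runs[0], then '1' + '0'*(r-1) for each later run
def expandRuns : List Nat → List Char
  | [] => []
  | r :: rs => List.replicate r '0' ++ rs.flatMap (fun k => '1' :: List.replicate (k - 1) '0')

def get_boundaries_alt (labels : List Int) : String :=
  match labels with
  | [] => ""
  | x :: xs => String.mk (expandRuns (runsGo x 1 xs))

-- ===== PRECONDITION & SPEC =====
-- Pre_ excludes only lists of length < 2, on which A's assert raises AssertionError.
def Pre_get_boundaries (labels : List Int) : Prop := 2 ≤ labels.length
instance (labels : List Int) : Decidable (Pre_get_boundaries labels) := by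
  unfold Pre_get_boundaries; infer_instance
def pvWitness_get_boundaries : List Int := [0, 1]

def Spec_get_boundaries (labels : List Int) (out : String) : Prop := out = get_boundaries_alt labels
instance (labels : List Int) (out : String) : Decidable (Spec_get_boundaries labels out) := by unfold Spec_get_boundaries; infer_instance

-- ===== CLAIM (what is proved, stated in full; the proofs are below) =====
def Claim_equal_get_boundaries : Prop := ∀ (labels : List Int), Dom_get_boundaries labels → Pre_get_boundaries labels → Spec_get_boundaries labels (get_boundaries labels)

-- ===== LEMMAS AND PROOFS =====

-- common characterisation: one char per adjacent pair
def pairs : Int → List Int → List Char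
  | _, [] => []
  | p, y :: ys => (if y ≠ p then '1' else '0') :: pairs y ys

theorem rangePairs (x : Int) (xs : List Int) :
    (List.range xs.length).map
      (fun k => if (x :: xs).getD (k + 1) 0 ≠ (x :: xs).getD k 0 then '1' else '0')
      = pairs x xs := by
  induction xs generalizing x with
  | nil => simp [pairs]
  | cons y ys ih =>
    rw [List.length_cons, List.range_succ_eq_map, List.map_cons, List.map_map]
    simp only [List.getD_cons_succ, List.getD_cons_zero, Function.comp]
    exact congrArg₂ List.cons rfl (ih y)

theorem portA_pairs (x : Int) (xs : List Int) :
    get_boundaries (x :: xs) = String.mk ('0' :: pairs x xs) := by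
  unfold get_boundaries
  rw [PySem.List.foldl_append_singleton_eq_map, PySem.List.pyRange_one]
  have hlen : ((PySem.List.len (x :: xs) - 1).toNat) = xs.length := by
    simp [PySem.List.len_eq]
  rw [hlen, List.map_map]
  have hfun : ((fun i => if PySem.List.pyGetD (x :: xs) i 0 ≠ PySem.List.pyGetD (x :: xs) (i - 1) 0 then '1' else '0') ∘ fun k : Nat => (1 : Int) + ↑k)
      = fun k : Nat => if (x :: xs).getD (k + 1) 0 ≠ (x :: xs).getD k 0 then '1' else '0' := by
    funext k
    have h1 : (1 : Int) + ↑k = ((k + 1 : Nat) : Int) := by push_cast; ring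
    have h2 : ((k + 1 : Nat) : Int) - 1 = ((k : Nat) : Int) := by push_cast; ring
    simp only [Function.comp_apply]
    rw [h1, h2, PySem.List.pyGetD_natCast, PySem.List.pyGetD_natCast]
  rw [hfun, rangePairs]
  rfl

theorem expand_runsGo (xs : List Int) (prev : Int) (cnt : Nat) (h : 1 ≤ cnt) :
    (runsGo prev cnt xs).flatMap (fun k => '1' :: List.replicate (k - 1) '0')
      = '1' :: (List.replicate (cnt - 1) '0' ++ pairs prev xs) := by
  induction xs generalizing prev cnt with
  | nil => simp [runsGo, pairs]
  | cons y ys ih =>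
    by_cases hy : y = prev
    · have := ih prev (cnt + 1) (by omega)
      simp only [runsGo, hy, beq_self_eq_true, if_true] at this ⊢
      rw [this]
      have hrep : List.replicate (cnt + 1 - 1) '0' = List.replicate (cnt - 1) '0' ++ ['0'] := by
        have : cnt + 1 - 1 = (cnt - 1) + 1 := by omega
        rw [this, List.replicate_succ']
      rw [hrep]
      simp [pairs, hy]
    · have hbeq : (y == prev) = false := by simp [hy]
      simp only [runsGo, hbeq, Bool.false_eq_true, if_false, List.flatMap_cons]
      rw [ih y 1 le_rfl]
      simp [pairs, hy]

theorem portB_pairs (x : Int) (xs : List Int) :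
    get_boundaries_alt (x :: xs) = String.mk ('0' :: pairs x xs) := by
  show String.mk (expandRuns (runsGo x 1 xs)) = String.mk ('0' :: pairs x xs)
  have key : ∀ (ys : List Int) (prev : Int) (cnt : Nat), 1 ≤ cnt →
      expandRuns (runsGo prev cnt ys) = List.replicate cnt '0' ++ pairs prev ys := by
    intro ys
    induction ys with
    | nil => intro prev cnt _; simp [runsGo, expandRuns, pairs]
    | cons y ts ih =>
      intro prev cnt hc
      by_cases hy : y = prev
      · have := ih prev (cnt + 1) (by omega)
        simp only [runsGo, hy, beq_self_eq_true, if_true] at this ⊢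
        rw [this, List.replicate_succ']
        simp [pairs, hy]
      · have hbeq : (y == prev) = false := by simp [hy]
        simp only [runsGo, hbeq, Bool.false_eq_true, if_false, expandRuns]
        rw [expand_runsGo ts y 1 le_rfl]
        simp [pairs, hy]
  rw [key xs x 1 le_rfl]
  rfl

-- ===== VERDICT (by name: the statement is the Claim_ definition above) =====
theorem get_boundaries_spec : Claim_equal_get_boundaries := by
  intro labels _ hpre
  unfold Spec_get_boundaries
  match labels, hpre with
  | x :: xs, _ => rw [portA_pairs, portB_pairs]
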